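-- pv_equiv track=rewrite | github.com/ameliahardy/124-pa7-transcripts | grading-for-167979089/chatbot.py | construct_seen_and_not_seen_sets
-- ===== SOURCE A (Python) =====
-- def construct_seen_and_not_seen_sets(user_ratings):
--     not_seen = set()
--     seen = set()
--     for i in range(len(user_ratings)):
--         if user_ratings[i] == 0:
--             not_seen.add(i)
--         else:
--             seen.add(i)
--     return seen, not_seen
-- ===== SOURCE B (Python) =====
-- def construct_seen_and_not_seen_sets(user_ratings):
--     # Search-driven: repeatedly locate the next 0 with list.index instead of
--     # branching on every element; seen is the complement of the zero positions.
--     not_seen = set()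
--     start = 0
--     while True:
--         try:
--             j = user_ratings.index(0, start)
--         except ValueError:
--             break
--         not_seen.add(j)
--         start = j + 1
--     seen = set(range(len(user_ratings))) - not_seen
--     return seen, not_seen
-- ===== Notes on version B (the rewrite author's own statement) =====
-- stated objective: alternative
-- what changed: Replaces the per-element two-way branching loop with a search-driven loop that repeatedly calls list.index(0, start) to collect the zero positions into not_seen, then derives seen as the set-difference of the full index range.
import Mathlib
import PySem

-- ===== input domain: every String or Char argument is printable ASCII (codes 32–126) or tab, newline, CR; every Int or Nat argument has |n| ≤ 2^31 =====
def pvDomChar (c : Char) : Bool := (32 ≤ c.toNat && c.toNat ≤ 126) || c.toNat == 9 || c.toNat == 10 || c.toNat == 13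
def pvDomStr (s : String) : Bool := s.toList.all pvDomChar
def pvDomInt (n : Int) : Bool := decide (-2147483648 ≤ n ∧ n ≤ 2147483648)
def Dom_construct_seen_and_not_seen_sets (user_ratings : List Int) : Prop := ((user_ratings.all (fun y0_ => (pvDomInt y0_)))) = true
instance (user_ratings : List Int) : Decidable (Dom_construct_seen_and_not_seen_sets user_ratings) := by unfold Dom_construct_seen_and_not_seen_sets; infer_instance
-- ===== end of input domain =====

-- B replaces A's per-element branching loop by a search-driven loop: it repeatedly finds
-- the next 0 with list.index(0, start) to build not_seen, and derives seen as the
-- set-difference of the full index range (alternative decomposition, same O(n) cost).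

-- ===== PORT A =====
-- A: for i in range(len(xs)): branch on xs[i] == 0, adding i to not_seen or seen; return (seen, not_seen)
def construct_seen_and_not_seen_sets (user_ratings : List Int) : List Int × List Int :=
  let r := (PySem.List.pyRange 0 (user_ratings.length) 1).foldl
    (fun (st : PySem.Set Int × PySem.Set Int) i =>
      if PySem.List.pyGetD user_ratings i 0 = 0 then (PySem.Set.add st.1 i, st.2)
      else (st.1, PySem.Set.add st.2 i))
    (PySem.Set.empty, PySem.Set.empty)      -- (not_seen, seen)
  (r.2, r.1)

-- ===== PORT B =====
-- xs.index(0, start) for 0 ≤ start: the first j ≥ start with xs[j] == 0 (none = ValueError)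
def pvIndexZeroFrom (xs : List Int) (start : Nat) : Option Nat :=
  ((xs.drop start).findIdx? (· == 0)).map (· + start)

theorem pvIndexZeroFrom_lt (xs : List Int) (start j : Nat)
    (h : pvIndexZeroFrom xs start = some j) : start ≤ j ∧ j < xs.length := by
  unfold pvIndexZeroFrom at h
  obtain ⟨k, hk, rfl⟩ := Option.map_eq_some_iff.mp h
  have := List.findIdx?_eq_some_iff_getElem.mp hk
  obtain ⟨hlt, -⟩ := this
  rw [List.length_drop] at hlt
  omega

-- B's while loop: find the next zero, add its index to the not_seen set, restart after it
def pvCollectZeros (xs : List Int) (start : Nat) (acc : PySem.Set Int) : PySem.Set Int :=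
  match h : pvIndexZeroFrom xs start with
  | none => acc
  | some j => pvCollectZeros xs (j + 1) (PySem.Set.add acc (j : Int))
termination_by xs.length - start
decreasing_by have := pvIndexZeroFrom_lt xs start j h; omega

-- B: while True: j = xs.index(0, start) … ; seen = set(range(len(xs))) - not_seen
def construct_seen_and_not_seen_sets_alt (user_ratings : List Int) : List Int × List Int :=
  let not_seen : PySem.Set Int := pvCollectZeros user_ratings 0 PySem.Set.empty
  let seen : PySem.Set Int :=
    PySem.Set.diff (PySem.Set.ofList (PySem.List.pyRange 0 (user_ratings.length) 1)) not_seen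
  (seen, not_seen)

-- ===== PRECONDITION & SPEC =====
def Spec_construct_seen_and_not_seen_sets (user_ratings : List Int) (out : List Int × List Int) : Prop := out = construct_seen_and_not_seen_sets_alt user_ratings
instance (user_ratings : List Int) (out : List Int × List Int) : Decidable (Spec_construct_seen_and_not_seen_sets user_ratings out) := by unfold Spec_construct_seen_and_not_seen_sets; infer_instance

-- ===== CLAIM (what is proved, stated in full; the proofs are below) =====
def Claim_equal_construct_seen_and_not_seen_sets : Prop := ∀ (user_ratings : List Int), Dom_construct_seen_and_not_seen_sets user_ratings → Spec_construct_seen_and_not_seen_sets user_ratings (construct_seen_and_not_seen_sets user_ratings)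

-- ===== LEMMAS AND PROOFS =====

-- the list of indices in [start, n) with zero rating, in order
def pvNotSeenL (xs : List Int) (start n : Nat) : List Int :=
  (PySem.List.pyRange start n 1).filter (fun i => PySem.List.pyGetD xs i 0 == 0)

-- the list of indices in [0, n) with nonzero rating, in order
def pvSeenL (xs : List Int) (n : Nat) : List Int :=
  (PySem.List.pyRange 0 n 1).filter (fun i => !(PySem.List.pyGetD xs i 0 == 0))

theorem pvFoldA (xs : List Int) (n : Nat) :
    (PySem.List.pyRange 0 n 1).foldl
      (fun (st : PySem.Set Int × PySem.Set Int) i =>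
        if PySem.List.pyGetD xs i 0 = 0 then (PySem.Set.add st.1 i, st.2)
        else (st.1, PySem.Set.add st.2 i))
      (PySem.Set.empty, PySem.Set.empty)
    = (pvNotSeenL xs 0 n, pvSeenL xs n) := by
  induction n with
  | zero => simp [pvNotSeenL, pvSeenL, PySem.Set.empty]
  | succ n ih =>
    have hc : ((n + 1 : Nat) : Int) = (n : Int) + 1 := by push_cast; ring
    have hsplit : PySem.List.pyRange 0 ((n + 1 : Nat) : Int) 1
        = PySem.List.pyRange 0 (n : Int) 1 ++ [(n : Int)] := by
      rw [hc, PySem.List.pyRange_one_succ_right (by positivity)]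
    have hnm : (n : Int) ∉ PySem.List.pyRange 0 (n : Int) 1 := by
      simp [PySem.List.mem_pyRange_one]
    have hns : (n : Int) ∉ (PySem.List.pyRange 0 (n : Int) 1).filter
        (fun i => PySem.List.pyGetD xs i 0 == 0) :=
      fun hmem => hnm (List.mem_of_mem_filter hmem)
    have hss : (n : Int) ∉ (PySem.List.pyRange 0 (n : Int) 1).filter
        (fun i => !(PySem.List.pyGetD xs i 0 == 0)) :=
      fun hmem => hnm (List.mem_of_mem_filter hmem)
    rw [hsplit, List.foldl_append, ih, List.foldl_cons, List.foldl_nil]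
    unfold pvNotSeenL pvSeenL
    simp only [Nat.cast_zero]
    rw [hsplit, List.filter_append, List.filter_append]
    by_cases h : PySem.List.pyGetD xs (n : Int) 0 = 0
    · rw [if_pos h, PySem.Set.add_of_not_mem hns]
      rw [show List.filter (fun i => PySem.List.pyGetD xs i 0 == 0) [(n : Int)] = [(n : Int)] by
            simp only [List.filter_cons, List.filter_nil]; rw [if_pos (by simpa using h)],
          show List.filter (fun i => !(PySem.List.pyGetD xs i 0 == 0)) [(n : Int)] = [] by
            simp only [List.filter_cons, List.filter_nil]; rw [if_neg (by simpa using h)]]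
      simp
    · rw [if_neg h, PySem.Set.add_of_not_mem hss]
      rw [show List.filter (fun i => PySem.List.pyGetD xs i 0 == 0) [(n : Int)] = [] by
            simp only [List.filter_cons, List.filter_nil]; rw [if_neg (by simpa using h)],
          show List.filter (fun i => !(PySem.List.pyGetD xs i 0 == 0)) [(n : Int)] = [(n : Int)] by
            simp only [List.filter_cons, List.filter_nil]; rw [if_pos (by simpa using h)]]
      simp

-- element access bridge: for start ≤ j < n = xs.length, xs[j] is in xs.drop start
theorem pvGetD_mem_drop (xs : List Int) (start : Nat) (i : Int)
    (h1 : (start : Int) ≤ i) (h2 : i < (xs.length : Int)) :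
    PySem.List.pyGetD xs i 0 ∈ xs.drop start := by
  have h0 : (0 : Int) ≤ i := le_trans (by positivity) h1
  rw [PySem.List.pyGetD_eq_getElem xs 0 h0 h2]
  have hidx : i.toNat - start < (xs.drop start).length := by
    rw [List.length_drop]; omega
  refine List.mem_iff_getElem.mpr ⟨i.toNat - start, hidx, ?_⟩
  rw [List.getElem_drop]
  congr 1
  omega

-- B's search loop collects exactly the zero indices ≥ start, appended to acc
theorem pvCollect_eq (xs : List Int) (start : Nat) (acc : PySem.Set Int) :
    (∀ a ∈ acc, a < (start : Int)) →
    pvCollectZeros xs start acc = acc ++ pvNotSeenL xs start xs.length := by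
  fun_induction pvCollectZeros xs start acc with
  | case1 start acc h =>
    intro _
    have hall : ∀ a ∈ xs.drop start, (a == 0) = false := List.findIdx?_eq_none_iff.mp
      (by simpa [pvIndexZeroFrom] using h)
    have hempty : pvNotSeenL xs start xs.length = [] := by
      unfold pvNotSeenL
      rw [List.filter_eq_nil_iff]
      intro i hi
      obtain ⟨hi1, hi2⟩ := (PySem.List.mem_pyRange_one).mp hi
      simpa using hall _ (pvGetD_mem_drop xs start i hi1 hi2)
    simp [hempty]
  | case2 start acc j h ih =>
    intro hacc
    obtain ⟨hsj, hjl⟩ := pvIndexZeroFrom_lt xs start j h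
    obtain ⟨k, hk, hkj⟩ := Option.map_eq_some_iff.mp (by simpa [pvIndexZeroFrom] using h)
    obtain ⟨hklt, hpk, hbefore⟩ := List.findIdx?_eq_some_iff_getElem.mp hk
    -- xs[j] = 0
    have hxj : PySem.List.pyGetD xs (j : Int) 0 = 0 := by
      rw [PySem.List.pyGetD_eq_getElem xs 0 (by positivity) (by exact_mod_cast hjl)]
      simp only [Int.toNat_natCast]
      have heq : (xs.drop start)[k]'hklt = xs[j]'hjl := by
        rw [List.getElem_drop]; congr 1; omega
      rw [← heq]
      simpa using hpk
    -- indices in [start, j) are nonzero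
    have hnz : ∀ i : Int, (start : Int) ≤ i → i < (j : Int) →
        ¬ PySem.List.pyGetD xs i 0 = 0 := by
      intro i hi1 hi2 hz
      have hlt : i < (xs.length : Int) := lt_of_lt_of_le hi2 (by exact_mod_cast le_of_lt hjl)
      have h0 : (0 : Int) ≤ i := le_trans (by positivity) hi1
      have hm : i.toNat - start < k := by omega
      apply hbefore (i.toNat - start) hm
      rw [PySem.List.pyGetD_eq_getElem xs 0 h0 hlt] at hz
      have heq : (xs.drop start)[i.toNat - start]'(by rw [List.length_drop]; omega)
          = xs[i.toNat]'(by omega) := by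
        rw [List.getElem_drop]; congr 1; omega
      simp only [beq_iff_eq]
      rw [heq]
      exact hz
    rw [ih (by intro a ha
               rcases (PySem.Set.mem_add acc (j : Int) a).mp ha with h1 | h1
               · exact lt_trans (hacc a h1) (by exact_mod_cast Nat.lt_succ_of_le hsj)
               · rw [h1]; exact_mod_cast Nat.lt_succ_self j)]
    have hjnacc : (j : Int) ∉ acc := fun hmem => absurd (hacc _ hmem) (by omega)
    rw [PySem.Set.add_of_not_mem hjnacc, List.append_assoc]
    congr 1
    -- [j] ++ pvNotSeenL (j+1) = pvNotSeenL start
    unfold pvNotSeenL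
    have hsplit : PySem.List.pyRange (start : Int) (xs.length : Int) 1
        = PySem.List.pyRange (start : Int) (j : Int) 1
          ++ PySem.List.pyRange (j : Int) (xs.length : Int) 1 :=
      PySem.List.pyRange_one_append _ _ _ (by exact_mod_cast hsj) (by exact_mod_cast le_of_lt hjl)
    have hcons : PySem.List.pyRange (j : Int) (xs.length : Int) 1
        = (j : Int) :: PySem.List.pyRange ((j : Int) + 1) (xs.length : Int) 1 :=
      PySem.List.pyRange_one_cons (by exact_mod_cast hjl)
    rw [hsplit, hcons, List.filter_append, List.filter_cons]
    have hfilt : List.filter (fun i => PySem.List.pyGetD xs i 0 == 0)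
        (PySem.List.pyRange (start : Int) (j : Int) 1) = [] := by
      rw [List.filter_eq_nil_iff]
      intro i hi
      obtain ⟨hi1, hi2⟩ := (PySem.List.mem_pyRange_one).mp hi
      simpa using hnz i hi1 hi2
    rw [hfilt, if_pos (by simpa using hxj)]
    rw [show ((j : Int) + 1) = (((j + 1 : Nat)) : Int) by push_cast; ring]
    simp

-- B's set difference against the full range equals the complementary filter
theorem pvSeenB (xs : List Int) :
    PySem.Set.diff (PySem.Set.ofList (PySem.List.pyRange 0 xs.length 1)) (pvNotSeenL xs 0 xs.length)
      = pvSeenL xs xs.length := by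
  rw [PySem.Set.ofList_eq_self_of_nodup _ (PySem.List.nodup_pyRange_one 0 xs.length)]
  have hdiff : ∀ (s t : List Int), PySem.Set.diff s t
      = s.filter (fun x => !(PySem.Set.contains t x)) := fun s t => rfl
  rw [hdiff]
  unfold pvSeenL
  apply List.filter_congr
  intro j hj
  have : j ∈ pvNotSeenL xs 0 xs.length ↔ PySem.List.pyGetD xs j 0 = 0 := by
    unfold pvNotSeenL
    simp [List.mem_filter, hj]
  by_cases h : PySem.List.pyGetD xs j 0 = 0 <;> simp [h, this]

-- ===== VERDICT (by name: the statement is the Claim_ definition above) =====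
theorem construct_seen_and_not_seen_sets_spec : Claim_equal_construct_seen_and_not_seen_sets := by
  intro xs _
  unfold Spec_construct_seen_and_not_seen_sets
  unfold construct_seen_and_not_seen_sets construct_seen_and_not_seen_sets_alt
  rw [pvFoldA, pvCollect_eq xs 0 PySem.Set.empty (by intro a ha; cases ha)]
  show _ = (PySem.Set.diff _ _, _)
  rw [show (PySem.Set.empty : PySem.Set Int) ++ pvNotSeenL xs 0 xs.length
        = pvNotSeenL xs 0 xs.length from List.nil_append _, pvSeenB]
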